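-- pv_equiv track=rewrite | github.com/unardev/hw-1-basics-Bartoeli | main.py | sample_get_fermat_numbers_in_range
-- ===== SOURCE A (Python) =====
-- def sample_get_fermat_numbers_in_range(n_from, n_to):
--     """
--     Sample function to return fermat numbers (https://en.wikipedia.org/wiki/Fermat_number) for numbers in given range
--     :param n_from: F_nfrom
--     :param n_to: F_nto
--     :return:
--         list of fermat numbers if n_from >= 0 and n_to >=0
--         [] if n_from < 0 or n_to < 0
--     """
--
--     # Fermat numbers are defined for non-negative integers only
--     if n_from < 0 or n_to < 0:
--         return []
--     else:
--         result = []
--         for a in range(n_from, n_to + 1):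
--             result.append(2 ** (2 ** a) + 1)
--         return result
-- ===== SOURCE B (Python) =====
-- def sample_get_fermat_numbers_in_range(n_from, n_to):
--     # Fermat numbers are defined for non-negative integers only
--     if n_from < 0 or n_to < 0:
--         return []
--     if n_to < n_from:
--         return []
--     # F_a - 1 = 2**(2**a); square the running value to step to the next index
--     v = 2 ** (2 ** n_from)
--     result = [v + 1]
--     for _ in range(n_from, n_to):
--         v = v * v
--         result.append(v + 1)
--     return result
-- ===== Notes on version B (the rewrite author's own statement) =====
-- stated objective: alternative
-- what changed: B computes only the first term 2**(2**n_from) directly and derives each subsequent Fermat number from the previous one by squaring a running value (F_{a+1}-1 = (F_a-1)^2), instead of recomputing the double exponential independently for every index.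
import Mathlib
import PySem

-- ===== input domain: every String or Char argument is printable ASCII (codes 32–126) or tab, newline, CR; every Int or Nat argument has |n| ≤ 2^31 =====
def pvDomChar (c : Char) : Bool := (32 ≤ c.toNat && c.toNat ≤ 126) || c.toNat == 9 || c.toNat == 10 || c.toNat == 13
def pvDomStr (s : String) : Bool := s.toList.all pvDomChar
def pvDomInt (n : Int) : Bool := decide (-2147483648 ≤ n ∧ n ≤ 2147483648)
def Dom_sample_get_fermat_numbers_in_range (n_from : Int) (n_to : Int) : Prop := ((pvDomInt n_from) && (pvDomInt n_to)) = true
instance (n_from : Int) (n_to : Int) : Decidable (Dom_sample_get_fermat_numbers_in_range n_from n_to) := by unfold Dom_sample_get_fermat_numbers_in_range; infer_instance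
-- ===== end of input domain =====

-- B derives each Fermat number from the previous one by squaring a running value
-- instead of recomputing 2 ** (2 ** a) independently for every index (objective: alternative).

-- ===== PORT A =====
def sample_get_fermat_numbers_in_range (n_from : Int) (n_to : Int) : List Int :=
  if n_from < 0 ∨ n_to < 0 then []
  else
    (PySem.List.pyRange n_from (n_to + 1) 1).foldl
      (fun result a => result ++ [(2 : Int) ^ ((2 : Int) ^ a.toNat).toNat + 1]) []

-- ===== PORT B =====
-- the 'for _ in range(n_from, n_to)' loop of Source B: k remaining iterations, running value v
def fermLoop : Nat → Int → List Int
  | 0, _ => []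
  | k + 1, v => (v * v + 1) :: fermLoop k (v * v)

def sample_get_fermat_numbers_in_range_alt (n_from : Int) (n_to : Int) : List Int :=
  if n_from < 0 ∨ n_to < 0 then []
  else if n_to < n_from then []
  else
    let v : Int := (2 : Int) ^ ((2 : Int) ^ n_from.toNat).toNat
    (v + 1) :: fermLoop (n_to - n_from).toNat v

-- ===== PRECONDITION & SPEC =====
def Spec_sample_get_fermat_numbers_in_range (n_from : Int) (n_to : Int) (out : List Int) : Prop := out = sample_get_fermat_numbers_in_range_alt n_from n_to
instance (n_from : Int) (n_to : Int) (out : List Int) : Decidable (Spec_sample_get_fermat_numbers_in_range n_from n_to out) := by unfold Spec_sample_get_fermat_numbers_in_range; infer_instance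

-- ===== CLAIM (what is proved, stated in full; the proofs are below) =====
def Claim_equal_sample_get_fermat_numbers_in_range : Prop := ∀ (n_from : Int) (n_to : Int), Dom_sample_get_fermat_numbers_in_range n_from n_to → Spec_sample_get_fermat_numbers_in_range n_from n_to (sample_get_fermat_numbers_in_range n_from n_to)

-- ===== LEMMAS AND PROOFS =====

-- the element A appends for index a
def pvF (a : Int) : Int := (2 : Int) ^ ((2 : Int) ^ a.toNat).toNat + 1

lemma pvF_natCast (m : Nat) : pvF (m : Int) = (2 : Int) ^ (2 ^ m) + 1 := by
  simp [pvF]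
  norm_cast

lemma pow2pow_sq (m : Nat) :
    (2 : Int) ^ (2 ^ m) * (2 : Int) ^ (2 ^ m) = (2 : Int) ^ (2 ^ (m + 1)) := by
  rw [← pow_add]
  congr 1
  omega

lemma fermLoop_eq_map (k m : Nat) :
    fermLoop k ((2 : Int) ^ (2 ^ m)) =
      (PySem.List.pyRange ((m : Int) + 1) ((m : Int) + 1 + k) 1).map pvF := by
  induction k generalizing m with
  | zero => simp [fermLoop, PySem.List.pyRange_one_eq_nil]
  | succ k ih =>
    rw [PySem.List.pyRange_one_cons (by omega), List.map_cons]
    have h1 : (m : Int) + 1 = ((m + 1 : Nat) : Int) := by omega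
    have h2 : (m : Int) + 1 + (k + 1 : Nat) = ((m + 1 : Nat) : Int) + 1 + k := by omega
    rw [h2, h1, ← ih (m + 1), pvF_natCast (m + 1), ← pow2pow_sq]
    rfl

lemma map_pvF_range (k m : Nat) :
    (PySem.List.pyRange (m : Int) ((m : Int) + k + 1) 1).map pvF =
      ((2 : Int) ^ (2 ^ m) + 1) :: fermLoop k ((2 : Int) ^ (2 ^ m)) := by
  rw [PySem.List.pyRange_one_cons (by omega), fermLoop_eq_map k m, List.map_cons, pvF_natCast m]
  have : (m : Int) + k + 1 = (m : Int) + 1 + k := by omega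
  rw [this]

-- ===== VERDICT (by name: the statement is the Claim_ definition above) =====
theorem sample_get_fermat_numbers_in_range_spec : Claim_equal_sample_get_fermat_numbers_in_range := by
  intro n_from n_to _
  unfold Spec_sample_get_fermat_numbers_in_range
  unfold sample_get_fermat_numbers_in_range sample_get_fermat_numbers_in_range_alt
  by_cases hneg : n_from < 0 ∨ n_to < 0
  · simp [hneg]
  · simp only [hneg, if_false]
    push Not at hneg
    obtain ⟨hf, ht⟩ := hneg
    rw [PySem.List.foldl_append_singleton_eq_map]
    show (PySem.List.pyRange n_from (n_to + 1) 1).map pvF = _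
    by_cases hlt : n_to < n_from
    · rw [if_pos hlt, PySem.List.pyRange_one_eq_nil (by omega)]
      simp
    · rw [if_neg hlt]
      push Not at hlt
      obtain ⟨m, hm⟩ : ∃ m : Nat, n_from = (m : Int) := ⟨n_from.toNat, by omega⟩
      subst hm
      obtain ⟨k, hk⟩ : ∃ k : Nat, n_to = (m : Int) + k := ⟨(n_to - m).toNat, by omega⟩
      subst hk
      have e1 : ((m : Int)).toNat = m := by omega
      have e2 : ((m : Int) + k - m).toNat = k := by omega
      have e3 : ((2 : Int) ^ m).toNat = 2 ^ m := by norm_cast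
      rw [e1, e2, e3, map_pvF_range k m]
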